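-- pv_equiv track=rewrite | github.com/bsm3d/Traktor-Bridge | Traktor_bridge.py | _get_cue_summary
-- ===== SOURCE A (Python) =====
-- from typing import Dict, List, Optional, Any, Tuple
-- from enum import Enum
--
-- class CueType(Enum):
--     """Cue point types for Traktor/Rekordbox mapping."""
--     GRID = 0
--     HOT_CUE = 1
--     FADE_IN = 2
--     FADE_OUT = 3
--     LOAD = 4
--     LOOP = 5
--
-- def _get_cue_summary(cue_points: List[Dict]) -> str:
--     """Generate cue point summary for display."""
--     summary = {'hotcues': 0, 'memory': 0, 'loops': 0}
--     for cue in cue_points: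
--         if cue.get('type') == CueType.HOT_CUE.value and cue.get('hotcue', -1) > 0:
--             summary['hotcues'] += 1
--         elif cue.get('type') == CueType.LOAD.value:
--             summary['memory'] += 1
--         elif cue.get('type') == CueType.LOOP.value and cue.get('len', 0) > 0:
--             summary['loops'] += 1
--
--     parts = []
--     if summary['hotcues'] > 0: parts.append(f"H{summary['hotcues']}")
--     if summary['memory'] > 0: parts.append(f"M{summary['memory']}")
--     if summary['loops'] > 0: parts.append(f"L{summary['loops']}")
--     return " ".join(parts) if parts else "-"
-- ===== SOURCE B (Python) =====
-- from typing import Dict, List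
-- from enum import Enum
--
-- class CueType(Enum):
--     GRID = 0
--     HOT_CUE = 1
--     FADE_IN = 2
--     FADE_OUT = 3
--     LOAD = 4
--     LOOP = 5
--
-- def _get_cue_summary(cue_points: List[Dict]) -> str:
--     """Generate cue point summary for display."""
--     hotcues = sum(1 for c in cue_points
--                   if c.get('type') == CueType.HOT_CUE.value and c.get('hotcue', -1) > 0)
--     memory = sum(1 for c in cue_points if c.get('type') == CueType.LOAD.value)
--     loops = sum(1 for c in cue_points
--                 if c.get('type') == CueType.LOOP.value and c.get('len', 0) > 0)
--     parts = [p for p, n in (("H", hotcues), ("M", memory), ("L", loops)) if n > 0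
--              for p in [f"{p}{n}"]]
--     return " ".join(parts) if parts else "-"
-- ===== Notes on version B (the rewrite author's own statement) =====
-- stated objective: alternative
-- what changed: Replaced the single stateful if/elif counting loop with three independent filtered-sum passes (one per cue category) and a comprehension-built parts list; correctness relies on the three type codes being mutually exclusive.
import Mathlib
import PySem

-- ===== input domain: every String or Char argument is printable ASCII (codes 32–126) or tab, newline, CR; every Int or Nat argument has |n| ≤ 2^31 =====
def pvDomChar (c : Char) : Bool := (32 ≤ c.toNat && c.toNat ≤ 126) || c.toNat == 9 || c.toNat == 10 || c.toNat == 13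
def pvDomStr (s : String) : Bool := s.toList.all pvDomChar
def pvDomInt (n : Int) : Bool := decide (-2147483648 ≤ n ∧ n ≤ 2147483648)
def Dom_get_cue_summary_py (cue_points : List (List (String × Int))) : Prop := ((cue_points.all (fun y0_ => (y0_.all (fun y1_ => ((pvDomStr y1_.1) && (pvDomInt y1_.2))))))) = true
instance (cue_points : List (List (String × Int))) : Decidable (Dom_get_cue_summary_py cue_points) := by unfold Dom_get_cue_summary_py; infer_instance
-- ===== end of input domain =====

-- B replaces A's single stateful if/elif counting loop by three independent filtered-count passes (one per category); same output.

-- ===== PORT A =====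
-- cue.get(k) / cue.get(k, d) on the association list, first match (Python dict semantics)
def cueGet (cue : List (String × Int)) (k : String) : Option Int := (PySem.Dict.mk cue).get? k
def cueGetD (cue : List (String × Int)) (k : String) (d : Int) : Int := (PySem.Dict.mk cue).getD k d

-- one iteration of A's for-loop over the (hotcues, memory, loops) state
def stepA (s : Int × Int × Int) (cue : List (String × Int)) : Int × Int × Int :=
  if cueGet cue "type" = some 1 ∧ cueGetD cue "hotcue" (-1) > 0 then (s.1 + 1, s.2.1, s.2.2)
  else if cueGet cue "type" = some 4 then (s.1, s.2.1 + 1, s.2.2)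
  else if cueGet cue "type" = some 5 ∧ cueGetD cue "len" 0 > 0 then (s.1, s.2.1, s.2.2 + 1)
  else s

def get_cue_summary_py (cue_points : List (List (String × Int))) : String :=
  let s := cue_points.foldl stepA (0, 0, 0)
  let parts : List String := []
  let parts := if s.1 > 0 then parts ++ ["H" ++ PySem.Int.toStr s.1] else parts
  let parts := if s.2.1 > 0 then parts ++ ["M" ++ PySem.Int.toStr s.2.1] else parts
  let parts := if s.2.2 > 0 then parts ++ ["L" ++ PySem.Int.toStr s.2.2] else parts
  if parts = [] then "-" else PySem.Str.join " " parts

-- ===== PORT B =====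
-- the three category predicates of Source B's generator-sums
def hotP (c : List (String × Int)) : Bool :=
  ((PySem.Dict.mk c).get? "type" == some 1) && decide ((PySem.Dict.mk c).getD "hotcue" (-1) > 0)
def memP (c : List (String × Int)) : Bool :=
  (PySem.Dict.mk c).get? "type" == some 4
def loopP (c : List (String × Int)) : Bool :=
  ((PySem.Dict.mk c).get? "type" == some 5) && decide ((PySem.Dict.mk c).getD "len" 0 > 0)

def get_cue_summary_py_alt (cue_points : List (List (String × Int))) : String :=
  let hotcues : Int := cue_points.countP hotP
  let memory : Int := cue_points.countP memP
  let loops : Int := cue_points.countP loopP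
  let parts := ([("H", hotcues), ("M", memory), ("L", loops)].filter (fun pn => pn.2 > 0)).map
    (fun pn => pn.1 ++ PySem.Int.toStr pn.2)
  if parts = [] then "-" else PySem.Str.join " " parts

-- ===== PRECONDITION & SPEC =====
def Spec_get_cue_summary_py (cue_points : List (List (String × Int))) (out : String) : Prop := out = get_cue_summary_py_alt cue_points
instance (cue_points : List (List (String × Int))) (out : String) : Decidable (Spec_get_cue_summary_py cue_points out) := by unfold Spec_get_cue_summary_py; infer_instance

-- ===== CLAIM (what is proved, stated in full; the proofs are below) =====
def Claim_equal_get_cue_summary_py : Prop := ∀ (cue_points : List (List (String × Int))), Dom_get_cue_summary_py cue_points → Spec_get_cue_summary_py cue_points (get_cue_summary_py cue_points)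

-- ===== LEMMAS AND PROOFS =====

-- A's fold computes the three independent counts (the three type codes are mutually exclusive)
theorem foldA_counts (l : List (List (String × Int))) (s : Int × Int × Int) :
    l.foldl stepA s =
      (s.1 + l.countP hotP, s.2.1 + l.countP memP, s.2.2 + l.countP loopP) := by
  induction l generalizing s with
  | nil => simp
  | cons c cs ih =>
    simp only [List.foldl_cons, List.countP_cons, ih]
    unfold stepA hotP memP loopP cueGet cueGetD
    by_cases h1 : (PySem.Dict.mk c).get? "type" = some 1 ∧ (PySem.Dict.mk c).getD "hotcue" (-1) > 0
    · obtain ⟨ht, hh⟩ := h1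
      simp [ht, hh]
      omega
    · simp only [h1, if_false]
      by_cases h4 : (PySem.Dict.mk c).get? "type" = some 4
      · have h1' : ¬ ((PySem.Dict.mk c).get? "type" == some 1) = true := by simp [h4]
        simp [h4]
        omega
      · simp only [h4, if_false]
        by_cases h5 : (PySem.Dict.mk c).get? "type" = some 5 ∧ (PySem.Dict.mk c).getD "len" 0 > 0
        · obtain ⟨ht, hl⟩ := h5
          simp [ht, hl]
          omega
        · have hhot : hotP c = false := by
            unfold hotP
            rcases Decidable.em ((PySem.Dict.mk c).get? "type" = some 1) with h | h
            · simp [h]; by_contra hc; exact h1 ⟨h, by omega⟩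
            · simp [h]
          have hloop : loopP c = false := by
            unfold loopP
            rcases Decidable.em ((PySem.Dict.mk c).get? "type" = some 5) with h | h
            · simp [h]; by_contra hc; exact h5 ⟨h, by omega⟩
            · simp [h]
          unfold hotP at hhot; unfold loopP at hloop
          simp [h4, h5, hhot, hloop]

-- ===== VERDICT (by name: the statement is the Claim_ definition above) =====
theorem get_cue_summary_py_spec : Claim_equal_get_cue_summary_py := by
  intro cue_points _
  unfold Spec_get_cue_summary_py get_cue_summary_py get_cue_summary_py_alt
  rw [foldA_counts]
  simp only [zero_add]
  by_cases h1 : (cue_points.countP hotP : Int) > 0 <;>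
    by_cases h2 : (cue_points.countP memP : Int) > 0 <;>
      by_cases h3 : (cue_points.countP loopP : Int) > 0 <;>
        simp only [h1, h2, h3, List.filter_cons, List.filter_nil, decide_eq_true_eq,
          if_true, if_false, List.map_cons, List.map_nil, List.nil_append,
          List.cons_ne_nil] <;>
        rfl
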